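-- pv_equiv track=rewrite | github.com/AkshayGuptaK/bridge | Bridge.py | calculateHighCardPoints
-- ===== SOURCE A (Python) =====
-- def calculateHighCardPoints(hand):
-- 	score = 0
-- 	for card in hand:
-- 		value = card[0] - 10
-- 		if value > 0:
-- 			score +=value
-- 		elif value == -9:
-- 			score +=4
-- 	return score
-- ===== SOURCE B (Python) =====
-- def calculateHighCardPoints(hand):
-- 	counts = {}
-- 	for card in hand:
-- 		rank = card[0]
-- 		counts[rank] = counts.get(rank, 0) + 1
-- 	total = 0
-- 	for rank, n in counts.items():
-- 		if rank == 1: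
-- 			total += 4 * n
-- 		elif rank > 10:
-- 			total += (rank - 10) * n
-- 	return total
-- ===== Notes on version B (the rewrite author's own statement) =====
-- stated objective: alternative
-- what changed: Groups the hand by rank into a count dictionary first, then computes the score per distinct rank (count times that rank's points) instead of scoring card by card in one branchy loop.
import Mathlib
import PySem

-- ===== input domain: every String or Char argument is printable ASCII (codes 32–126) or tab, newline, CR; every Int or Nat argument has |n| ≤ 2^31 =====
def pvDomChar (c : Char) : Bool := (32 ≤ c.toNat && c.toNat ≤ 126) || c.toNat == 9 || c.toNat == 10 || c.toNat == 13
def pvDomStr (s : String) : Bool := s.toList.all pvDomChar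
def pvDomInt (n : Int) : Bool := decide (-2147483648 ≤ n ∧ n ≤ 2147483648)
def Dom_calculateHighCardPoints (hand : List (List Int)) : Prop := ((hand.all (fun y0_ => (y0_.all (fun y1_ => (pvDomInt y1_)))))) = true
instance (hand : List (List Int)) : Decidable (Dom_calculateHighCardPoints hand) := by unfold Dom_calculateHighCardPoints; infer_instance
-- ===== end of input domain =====

-- B groups the hand by rank into a count dictionary and scores per distinct rank (count × points); equivalence of return values on hands with no empty card.
-- ===== PORT A =====
def calculateHighCardPoints (hand : List (List Int)) : Int :=
  hand.foldl (fun score card =>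
    let value := PySem.List.pyGetD card 0 0 - 10
    if value > 0 then score + value
    else if value = -9 then score + 4
    else score) 0

-- ===== PORT B =====
def calculateHighCardPoints_alt (hand : List (List Int)) : Int :=
  let counts := hand.foldl (fun d card =>
    let rank := PySem.List.pyGetD card 0 0
    d.insert rank (d.getD rank 0 + 1)) PySem.Dict.empty
  counts.items.foldl (fun total rn =>
    if rn.1 == 1 then total + 4 * rn.2
    else if rn.1 > 10 then total + (rn.1 - 10) * rn.2
    else total) 0

-- ===== PRECONDITION & SPEC =====
-- Pre_ excludes hands containing an empty card, on which the Python A raises IndexError (card[0]); B raises there too.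
def Pre_calculateHighCardPoints (hand : List (List Int)) : Prop := ∀ card ∈ hand, card ≠ []
instance (hand : List (List Int)) : Decidable (Pre_calculateHighCardPoints hand) := by unfold Pre_calculateHighCardPoints; infer_instance
def pvWitness_calculateHighCardPoints : List (List Int) := [[1], [13, 2], [7, 0], [1]]
def Spec_calculateHighCardPoints (hand : List (List Int)) (out : Int) : Prop := out = calculateHighCardPoints_alt hand
instance (hand : List (List Int)) (out : Int) : Decidable (Spec_calculateHighCardPoints hand out) := by unfold Spec_calculateHighCardPoints; infer_instance

-- ===== CLAIM (what is proved, stated in full; the proofs are below) =====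
def Claim_equal_calculateHighCardPoints : Prop := ∀ (hand : List (List Int)), Dom_calculateHighCardPoints hand → Pre_calculateHighCardPoints hand → Spec_calculateHighCardPoints hand (calculateHighCardPoints hand)

-- ===== LEMMAS AND PROOFS =====
-- points of a single rank (proof-only abbreviation; disjoint branches, so A's and B's branch orders agree)
def hcpPts (r : Int) : Int := if r = 1 then 4 else if r > 10 then r - 10 else 0

lemma hcp_A_foldl (hand : List (List Int)) (s : Int) :
    hand.foldl (fun score card =>
      let value := PySem.List.pyGetD card 0 0 - 10
      if value > 0 then score + value
      else if value = -9 then score + 4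
      else score) s
    = s + ((hand.map (fun card => PySem.List.pyGetD card 0 0)).map hcpPts).sum := by
  induction hand generalizing s with
  | nil => simp
  | cons c t ih =>
    simp only [List.foldl_cons, List.map_cons, List.sum_cons, ih, hcpPts]
    split_ifs with h1 h2 h3 h4 h5 <;> omega

lemma hcp_B_foldl (l : List (Int × Int)) (s : Int) :
    l.foldl (fun total rn =>
      if rn.1 == 1 then total + 4 * rn.2
      else if rn.1 > 10 then total + (rn.1 - 10) * rn.2
      else total) s
    = s + (l.map (fun rn => hcpPts rn.1 * rn.2)).sum := by
  induction l generalizing s with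
  | nil => simp
  | cons p t ih =>
    simp only [List.foldl_cons, List.map_cons, List.sum_cons]
    rw [ih]
    simp only [hcpPts, beq_iff_eq]
    split_ifs with h1 h2 <;> ring

lemma hcp_single (x : Int) : ∀ (K : List Int), K.Nodup → x ∈ K →
    (K.map (fun k => if k = x then hcpPts k else 0)).sum = hcpPts x := by
  intro K
  induction K with
  | nil => intro _ hx; cases hx
  | cons a t ih =>
    intro hnd hx
    simp only [List.map_cons, List.sum_cons]
    rcases List.mem_cons.mp hx with h | h
    · subst h
      have : ∀ k ∈ t, (if k = x then hcpPts k else 0) = 0 := by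
        intro k hk
        have : k ≠ x := fun e => (List.nodup_cons.mp hnd).1 (e ▸ hk)
        simp [this]
      rw [if_pos rfl, List.sum_eq_zero (by simpa using this)]
      ring
    · have ha : a ≠ x := fun e => (List.nodup_cons.mp hnd).1 (e ▸ h)
      rw [if_neg ha, ih (List.nodup_cons.mp hnd).2 h]
      ring

lemma hcp_group (K : List Int) (hnd : K.Nodup) : ∀ (xs : List Int), (∀ x ∈ xs, x ∈ K) →
    (K.map (fun k => hcpPts k * (xs.count k : Int))).sum = (xs.map hcpPts).sum := by
  intro xs
  induction xs with
  | nil => intro _; simp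
  | cons x t ih =>
    intro hmem
    have step : (K.map (fun k => hcpPts k * ((x :: t).count k : Int))).sum
        = (K.map (fun k => hcpPts k * (t.count k : Int))).sum
          + (K.map (fun k => if k = x then hcpPts k else 0)).sum := by
      rw [← List.sum_map_add]
      refine congrArg List.sum (List.map_congr_left fun k _ => ?_)
      simp only [List.count_cons]
      rcases eq_or_ne k x with h | h
      · simp only [h, beq_self_eq_true, if_true]
        push_cast
        ring
      · simp [h, Ne.symm h]
    rw [step, ih (fun y hy => hmem y (List.mem_cons_of_mem _ hy)),
        hcp_single x K hnd (hmem x (List.mem_cons_self)), List.map_cons, List.sum_cons]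
    ring

lemma hcp_counts_eq (hand : List (List Int)) :
    hand.foldl (fun d card =>
      let rank := PySem.List.pyGetD card 0 0
      d.insert rank (d.getD rank 0 + 1)) PySem.Dict.empty
    = PySem.Dict.counter (hand.map (fun card => PySem.List.pyGetD card 0 0)) := by
  rw [← PySem.Dict.foldl_insert_getD_add_one_eq_counter, List.foldl_map]

-- ===== VERDICT (by name: the statement is the Claim_ definition above) =====
theorem calculateHighCardPoints_spec : Claim_equal_calculateHighCardPoints := by
  intro hand _ _
  unfold Spec_calculateHighCardPoints calculateHighCardPoints calculateHighCardPoints_alt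
  rw [hcp_A_foldl, hcp_counts_eq]
  simp only [PySem.Dict.items_counter]
  rw [hcp_B_foldl]
  have := hcp_group (PySem.Set.ofList (hand.map (fun card => PySem.List.pyGetD card 0 0)))
      (PySem.Set.nodup_ofList _) (hand.map (fun card => PySem.List.pyGetD card 0 0))
      (fun x hx => (PySem.Set.mem_ofList _ _).mpr hx)
  simp only [List.map_map, Function.comp_def] at this ⊢
  omega
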